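-- pv_equiv track=rewrite | github.com/DimasFatchurroziq/Aplikasi_Pendeteksi_Kesamaan_Tugas | blog/excecute/preview.py | code_paragraph
-- ===== SOURCE A (Python) =====
-- def code_paragraph(positions, tokenize_list):
--     join_list = []
--     i = 0
--     while i < len(positions):
--         code_join = tokenize_list[positions[i]]
--         k = i
--         while k + 1 < len(positions) and positions[k] - positions[k + 1] == -1:
--             code_join +=  '<br>' + tokenize_list[positions[k + 1]]
--             k += 1
--         i = k + 1
--         join_list.append(code_join)
--     return join_list
-- ===== SOURCE B (Python) =====
-- def code_paragraph(positions, tokenize_list):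
--     # pass 1: split positions into maximal runs of consecutive-by-1 values
--     runs = []
--     cur = []
--     for p in positions:
--         if cur and p == cur[-1] + 1:
--             cur.append(p)
--         else:
--             if cur:
--                 runs.append(cur)
--             cur = [p]
--     if cur:
--         runs.append(cur)
--     # pass 2: format each run
--     return ['<br>'.join(tokenize_list[p] for p in run) for run in runs]
-- ===== Notes on version B (the rewrite author's own statement) =====
-- stated objective: alternative
-- what changed: B splits the work into two passes - a flat forward scan that groups positions into maximal consecutive runs, then a map that joins each run's tokens with '<br>' - replacing A's nested while loops with index jumping.
import Mathlib
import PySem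

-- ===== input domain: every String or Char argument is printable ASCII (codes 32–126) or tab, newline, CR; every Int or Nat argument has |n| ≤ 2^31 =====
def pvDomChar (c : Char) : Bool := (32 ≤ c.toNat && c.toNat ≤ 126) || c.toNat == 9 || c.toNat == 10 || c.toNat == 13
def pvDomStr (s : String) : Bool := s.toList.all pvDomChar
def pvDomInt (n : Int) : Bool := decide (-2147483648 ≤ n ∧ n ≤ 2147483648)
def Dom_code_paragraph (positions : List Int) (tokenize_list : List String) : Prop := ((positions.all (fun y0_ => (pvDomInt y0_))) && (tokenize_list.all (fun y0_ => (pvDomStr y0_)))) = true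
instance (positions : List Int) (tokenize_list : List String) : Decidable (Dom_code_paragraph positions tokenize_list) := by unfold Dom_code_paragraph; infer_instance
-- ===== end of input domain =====

-- B groups positions into maximal consecutive runs in one flat scan and then formats each
-- run with a '<br>' join, instead of A's nested while loops with index jumping; same cost.

-- ===== PORT A =====
-- inner while loop of A: extends code_join while positions[k] - positions[k+1] == -1;
-- returns the final k+1 (A's new i) and the final code_join.  The Nat fuel argument
-- only makes the while-loop total (it is always at least the remaining iterations).
def pvAInner (positions : List Int) (tokenize_list : List String) : Nat → Nat → String → Nat × String
  | 0, k, acc => (k + 1, acc)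
  | fuel + 1, k, acc =>
    if k + 1 < positions.length ∧ positions.getD k 0 - positions.getD (k + 1) 0 = -1 then
      pvAInner positions tokenize_list fuel (k + 1)
        (acc ++ "<br>" ++ PySem.List.pyGetD tokenize_list (positions.getD (k + 1) 0) "")
    else (k + 1, acc)

-- outer while loop of A (same fuel scheme)
def pvAOuter (positions : List Int) (tokenize_list : List String) : Nat → Nat → List String
  | 0, _ => []
  | fuel + 1, i =>
    if i < positions.length then
      (pvAInner positions tokenize_list positions.length i
          (PySem.List.pyGetD tokenize_list (positions.getD i 0) "")).2 ::
        pvAOuter positions tokenize_list fuel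
          (pvAInner positions tokenize_list positions.length i
            (PySem.List.pyGetD tokenize_list (positions.getD i 0) "")).1
    else []

def code_paragraph (positions : List Int) (tokenize_list : List String) : List String :=
  pvAOuter positions tokenize_list (positions.length + 1) 0

-- ===== PORT B =====
-- fold state: (finished runs, current run); mirrors Source B's for-loop body
def pvBStep (st : List (List Int) × List Int) (p : Int) : List (List Int) × List Int :=
  if st.2 ≠ [] ∧ p = st.2.getLastD 0 + 1 then (st.1, st.2 ++ [p])
  else ((if st.2 ≠ [] then st.1 ++ [st.2] else st.1), [p])

def code_paragraph_alt (positions : List Int) (tokenize_list : List String) : List String :=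
  let st := positions.foldl pvBStep ([], [])
  let runs := if st.2 ≠ [] then st.1 ++ [st.2] else st.1
  runs.map (fun run =>
    PySem.Str.join "<br>" (run.map (fun p => PySem.List.pyGetD tokenize_list p "")))

-- ===== PRECONDITION & SPEC =====
-- Pre_ excludes exactly the inputs where A raises IndexError: some position is not a
-- valid Python index into tokenize_list.
def Pre_code_paragraph (positions : List Int) (tokenize_list : List String) : Prop :=
  ∀ p ∈ positions, PySem.Raise.InRange tokenize_list.length p
instance (positions : List Int) (tokenize_list : List String) : Decidable (Pre_code_paragraph positions tokenize_list) := by unfold Pre_code_paragraph; infer_instance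

def pvWitness_code_paragraph : List Int × List String := ([0, 1, 3, 2], ["a", "b", "c", "d"])

def Spec_code_paragraph (positions : List Int) (tokenize_list : List String) (out : List String) : Prop := out = code_paragraph_alt positions tokenize_list
instance (positions : List Int) (tokenize_list : List String) (out : List String) : Decidable (Spec_code_paragraph positions tokenize_list out) := by unfold Spec_code_paragraph; infer_instance

-- ===== CLAIM (what is proved, stated in full; the proofs are below) =====
def Claim_equal_code_paragraph : Prop := ∀ (positions : List Int) (tokenize_list : List String), Dom_code_paragraph positions tokenize_list → Pre_code_paragraph positions tokenize_list → Spec_code_paragraph positions tokenize_list (code_paragraph positions tokenize_list)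

-- ===== LEMMAS AND PROOFS =====

-- canonical description of the runs: splitRun peels the longest consecutive prefix
def splitRun (prev : Int) : List Int → List Int × List Int
  | [] => ([], [])
  | q :: qs =>
      if q = prev + 1 then
        let r := splitRun q qs
        (q :: r.1, r.2)
      else ([], q :: qs)

theorem splitRun_snd_len (prev : Int) (l : List Int) :
    (splitRun prev l).2.length ≤ l.length := by
  induction l generalizing prev with
  | nil => simp [splitRun]
  | cons q qs ih =>
    simp only [splitRun]
    split
    · exact le_trans (ih q) (by simp)
    · simp

def runsOf : List Int → List (List Int)
  | [] => []
  | p :: rest =>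
      let r := splitRun p rest
      (p :: r.1) :: runsOf r.2
termination_by l => l.length
decreasing_by
  have := splitRun_snd_len p rest
  simp only [List.length_cons]
  omega

theorem splitRun_append (prev : Int) (l : List Int) :
    (splitRun prev l).1 ++ (splitRun prev l).2 = l := by
  induction l generalizing prev with
  | nil => simp [splitRun]
  | cons q qs ih =>
    simp only [splitRun]
    split
    · simpa using ih q
    · simp

-- A's string for one run
def runStrA (tokenize_list : List String) (run : List Int) : String :=
  match run with
  | [] => ""
  | p :: r => r.foldl (fun a q => a ++ "<br>" ++ PySem.List.pyGetD tokenize_list q "")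
      (PySem.List.pyGetD tokenize_list p "")

-- A's inner loop computes the fold over the consecutive run starting after index k
theorem pvAInner_eq (positions : List Int) (tokenize_list : List String) :
    ∀ (rest : List Int) (fuel k : Nat) (prev : Int) (acc : String),
      positions.drop k = prev :: rest → rest.length ≤ fuel →
      pvAInner positions tokenize_list fuel k acc =
        (k + 1 + (splitRun prev rest).1.length,
         (splitRun prev rest).1.foldl
           (fun a q => a ++ "<br>" ++ PySem.List.pyGetD tokenize_list q "") acc) := by
  intro rest
  induction rest with
  | nil =>
    intro fuel k prev acc h _
    have hlen : positions.length = k + 1 := by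
      have := congrArg List.length h
      simp [List.length_drop] at this
      omega
    cases fuel with
    | zero => simp [pvAInner, splitRun]
    | succ f =>
      rw [pvAInner, if_neg (by omega)]
      simp [splitRun]
  | cons q qs ih =>
    intro fuel k prev acc h hfuel
    obtain ⟨f, rfl⟩ : ∃ f, fuel = f + 1 := ⟨fuel - 1, by simp at hfuel; omega⟩
    have hlen : positions.length = k + 2 + qs.length := by
      have := congrArg List.length h
      simp [List.length_drop] at this
      omega
    have hk : positions[k]? = some prev := by
      have : positions[k]? = (positions.drop k)[0]? := by
        simp [List.getElem?_drop]
      rw [this, h]; rfl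
    have hk1 : positions[k+1]? = some q := by
      have : positions[k+1]? = (positions.drop k)[1]? := by
        simp [List.getElem?_drop]
      rw [this, h]; rfl
    have hgk : positions.getD k 0 = prev := by simp [List.getD, hk]
    have hgk1 : positions.getD (k+1) 0 = q := by simp [List.getD, hk1]
    have hdrop : positions.drop (k+1) = q :: qs := by
      have : positions.drop (k+1) = (positions.drop k).drop 1 := by
        rw [List.drop_drop]
      rw [this, h]; rfl
    rw [pvAInner]
    by_cases hc : q = prev + 1
    · rw [if_pos ⟨by omega, by rw [hgk, hgk1]; omega⟩]
      rw [hgk1, ih f (k+1) q _ hdrop (by simp at hfuel ⊢; omega)]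
      simp only [splitRun, if_pos hc, Prod.mk.injEq, List.length_cons, List.foldl_cons]
      exact ⟨by omega, trivial⟩
    · rw [if_neg (by rw [hgk, hgk1]; rintro ⟨-, hh⟩; exact hc (by omega))]
      simp [splitRun, hc]

-- A's outer loop maps runStrA over the runs of the remaining suffix
theorem pvAOuter_eq (positions : List Int) (tokenize_list : List String) :
    ∀ (fuel i : Nat), positions.length - i < fuel →
      pvAOuter positions tokenize_list fuel i =
        (runsOf (positions.drop i)).map (runStrA tokenize_list) := by
  intro fuel
  induction fuel with
  | zero => intro i h; omega
  | succ f ih =>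
    intro i hfi
    rw [pvAOuter]
    by_cases h : i < positions.length
    · rw [if_pos h]
      obtain ⟨p, rest, hd⟩ : ∃ p rest, positions.drop i = p :: rest := by
        cases hdi : positions.drop i with
        | nil => exfalso; have := congrArg List.length hdi; simp [List.length_drop] at this; omega
        | cons a b => exact ⟨a, b, rfl⟩
      have hrl : rest.length ≤ positions.length := by
        have := congrArg List.length hd
        simp [List.length_drop] at this
        omega
      have hgi : positions.getD i 0 = p := by
        have h0 : positions[i]? = (positions.drop i)[0]? := by simp [List.getElem?_drop]
        simp [List.getD, h0, hd]
      rw [hgi, pvAInner_eq positions tokenize_list rest positions.length i p _ hd hrl]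
      have hsra := splitRun_append p rest
      set r1 := (splitRun p rest).1 with hr1
      set r2 := (splitRun p rest).2 with hr2
      have hdrop2 : positions.drop (i + 1 + r1.length) = r2 := by
        have e1 : positions.drop (i+1) = rest := by
          have : positions.drop (i+1) = (positions.drop i).drop 1 := by rw [List.drop_drop]
          rw [this, hd]; rfl
        have : positions.drop (i + 1 + r1.length) = (positions.drop (i+1)).drop r1.length := by
          rw [List.drop_drop]
        rw [this, e1, ← hsra, List.drop_left]
      rw [ih (i + 1 + r1.length) (by omega), hdrop2, hd]
      rw [runsOf]
      simp only [← hr1, ← hr2, List.map_cons]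
      congr 1
    · rw [if_neg h]
      rw [List.drop_eq_nil_of_le (by omega)]
      simp [runsOf]

-- every run produced by runsOf is nonempty (they all start with a cons)
theorem runsOf_ne_nil : ∀ (l : List Int), ∀ run ∈ runsOf l, run ≠ [] := by
  intro l
  induction' hn : l.length using Nat.strong_induction_on with n ih generalizing l
  cases l with
  | nil => simp [runsOf]
  | cons p rest =>
    rw [runsOf]
    intro run hrun
    rcases List.mem_cons.mp hrun with h | h
    · simp [h]
    · have hlen : (splitRun p rest).2.length < n := by
        have := splitRun_snd_len p rest
        simp at hn; omega
      exact ih _ hlen _ rfl run h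

-- B's fold invariant
theorem pvBFold (runs : List (List Int)) (cur : List Int) :
    ∀ (rest : List Int), cur ≠ [] →
      (let st := rest.foldl pvBStep (runs, cur);
       if st.2 ≠ [] then st.1 ++ [st.2] else st.1) =
      runs ++ ((cur ++ (splitRun (cur.getLastD 0) rest).1) ::
               runsOf (splitRun (cur.getLastD 0) rest).2) := by
  intro rest
  induction rest generalizing runs cur with
  | nil =>
    intro hcur
    simp [splitRun, runsOf, hcur]
  | cons q qs ih =>
    intro hcur
    simp only [List.foldl_cons]
    by_cases hc : q = cur.getLastD 0 + 1
    · have hb : pvBStep (runs, cur) q = (runs, cur ++ [q]) := by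
        simp [pvBStep, hcur, hc]
      rw [hb, ih runs (cur ++ [q]) (by simp)]
      have hlast : (cur ++ [q]).getLastD 0 = q := by
        simp [List.getLastD_eq_getLast?]
      rw [hlast]
      simp only [splitRun, if_pos hc]
      simp
    · have hb : pvBStep (runs, cur) q = (runs ++ [cur], [q]) := by
        simp only [pvBStep]
        rw [if_neg (by rintro ⟨-, h2⟩; exact hc h2)]
        simp [hcur]
      rw [hb, ih (runs ++ [cur]) [q] (by simp)]
      have : ([q] : List Int).getLastD 0 = q := rfl
      rw [this]
      simp only [splitRun, if_neg hc]
      rw [runsOf]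
      simp

-- joining string lemmas
theorem join_cons_cons' (sep a b : String) (l : List String) :
    PySem.Str.join sep (a :: b :: l) = a ++ sep ++ PySem.Str.join sep (b :: l) := by
  apply String.ext
  simp [PySem.Str.join, PySem.Chars.join_cons_cons]

theorem foldl_join (l : List String) : ∀ (x : String),
    l.foldl (fun a t => a ++ "<br>" ++ t) x = PySem.Str.join "<br>" (x :: l) := by
  induction l with
  | nil => intro x; simp [PySem.Str.join]
  | cons y l ih =>
    intro x
    rw [List.foldl_cons, ih (x ++ "<br>" ++ y), join_cons_cons' "<br>" x y l]
    cases l with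
    | nil => apply String.ext; simp [PySem.Str.join]
    | cons z l' => rw [join_cons_cons', join_cons_cons']; simp [String.append_assoc]

theorem runStrA_eq_join (tokenize_list : List String) (run : List Int) (h : run ≠ []) :
    runStrA tokenize_list run =
      PySem.Str.join "<br>" (run.map (fun p => PySem.List.pyGetD tokenize_list p "")) := by
  cases run with
  | nil => exact absurd rfl h
  | cons p r =>
    simp only [runStrA, List.map_cons]
    have hf : (fun (a : String) (q : Int) => a ++ "<br>" ++ PySem.List.pyGetD tokenize_list q "")
        = fun a q => (fun (a : String) (t : String) => a ++ "<br>" ++ t) a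
            (PySem.List.pyGetD tokenize_list q "") := rfl
    rw [hf, ← List.foldl_map, foldl_join]

-- B computes the joins over runsOf
theorem code_paragraph_alt_eq (positions : List Int) (tokenize_list : List String) :
    code_paragraph_alt positions tokenize_list =
      (runsOf positions).map (fun run =>
        PySem.Str.join "<br>" (run.map (fun p => PySem.List.pyGetD tokenize_list p ""))) := by
  cases positions with
  | nil => simp [code_paragraph_alt, runsOf]
  | cons p rest =>
    have h0 : pvBStep ([], []) p = ([], [p]) := by simp [pvBStep]
    have := pvBFold [] [p] rest (by simp)
    simp only [code_paragraph_alt, List.foldl_cons, h0]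
    rw [this]
    have : ([p] : List Int).getLastD 0 = p := rfl
    rw [this, runsOf]
    simp

-- ===== VERDICT (by name: the statement is the Claim_ definition above) =====
theorem code_paragraph_spec : Claim_equal_code_paragraph := by
  intro positions tokenize_list _ _
  unfold Spec_code_paragraph
  rw [code_paragraph, pvAOuter_eq positions tokenize_list (positions.length + 1) 0 (by omega), List.drop_zero,
    code_paragraph_alt_eq]
  exact List.map_congr_left (fun run hrun =>
    runStrA_eq_join tokenize_list run (runsOf_ne_nil positions run hrun))
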